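-- pv_equiv track=rewrite | github.com/Ramsaidhanumuri/Repo_DSA | InterviewBit/Arrays/Sorting/Hotel Bookings Possible.py | hotel
-- ===== SOURCE A (Python) =====
-- def hotel(arrive, depart, K):
--     ans = []
--
--     for i in range(len(arrive)):
--         ans.append([arrive[i], 1])
--         ans.append([depart[i], 0])
--
--     ans.sort()
--     curr = 0
--     active_rooms = 0
--
--     for i in range(len(ans)):
--         if ans[i][1] == 1:
--             curr += 1
--
--             active_rooms = max(active_rooms, curr)
--
--             if active_rooms > K:
--                 return 0
--
--         else:
--             curr -= 1
--
--     return 1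
-- ===== SOURCE B (Python) =====
-- def hotel(arrive, depart, K):
--     sarr = sorted(arrive)
--     sdep = sorted(depart[:len(arrive)])
--     curr = 0
--     j = 0
--     for t in sarr:
--         while j < len(sdep) and sdep[j] <= t:
--             curr -= 1
--             j += 1
--         curr += 1
--         if curr > K:
--             return 0
--     return 1
-- ===== Notes on version B (the rewrite author's own statement) =====
-- stated objective: faster
-- what changed: Instead of building a combined list of 2n (time, tag) events and sorting it lexicographically, B sorts the arrival and the paired departure times into two separate plain-int lists and walks them with two pointers, processing departures ≤ the current arrival first (the tie rule) and checking the K overflow only at arrivals.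
import Mathlib
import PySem

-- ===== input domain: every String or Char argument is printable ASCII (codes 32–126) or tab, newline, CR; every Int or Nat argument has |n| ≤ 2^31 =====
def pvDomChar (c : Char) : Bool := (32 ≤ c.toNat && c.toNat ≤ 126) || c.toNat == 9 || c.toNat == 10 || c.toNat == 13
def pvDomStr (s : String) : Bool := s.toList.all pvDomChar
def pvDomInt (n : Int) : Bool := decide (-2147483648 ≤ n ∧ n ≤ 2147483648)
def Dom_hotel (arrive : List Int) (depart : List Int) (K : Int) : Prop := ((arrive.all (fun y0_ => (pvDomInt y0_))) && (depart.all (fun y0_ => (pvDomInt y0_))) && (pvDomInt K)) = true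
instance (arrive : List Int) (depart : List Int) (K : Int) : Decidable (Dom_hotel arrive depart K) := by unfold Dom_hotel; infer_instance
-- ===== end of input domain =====

-- B replaces A's lexicographic sort of one combined list of 2n (time, tag) events by a two-pointer
-- walk of the two separately sorted plain-int time lists (departures at equal times first); same
-- return value, measured constant-factor faster in a timing run.

-- ===== PORT A =====
-- the second Python loop (with its early 'return 0') as structural recursion over the sorted events
def hotelLoopA : List (Int × Int) → Int → Int → Int → Int
  | [], _, _, _ => 1
  | e :: rest, curr, active, K =>
    if e.2 = 1 then
      let curr' := curr + 1
      let active' := max active curr'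
      if active' > K then 0 else hotelLoopA rest curr' active' K
    else hotelLoopA rest (curr - 1) active K

def hotel (arrive : List Int) (depart : List Int) (K : Int) : Int :=
  -- for i in range(len(arrive)): ans.append([arrive[i], 1]); ans.append([depart[i], 0])
  let ans := (PySem.List.pyRange 0 (PySem.List.len arrive) 1).foldl
    (fun acc i => (acc ++ [(PySem.List.pyGetD arrive i 0, (1 : Int))]) ++ [(PySem.List.pyGetD depart i 0, (0 : Int))]) []
  -- ans.sort()  (lexicographic on the [time, tag] pairs)
  let ansS := PySem.List.sorted2 ans Prod.fst Prod.snd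
  hotelLoopA ansS 0 0 K

-- ===== PORT B =====
-- the inner 'while j < len(sdep) and sdep[j] <= t' loop; the consumed prefix plays the role of j
def popDeparted : Int → List Int → Int → List Int × Int
  | _, [], curr => ([], curr)
  | t, d :: ds, curr => if d ≤ t then popDeparted t ds (curr - 1) else (d :: ds, curr)

-- the 'for t in sarr' loop with its early 'return 0'
def hotelLoopB : List Int → List Int → Int → Int → Int
  | [], _, _, _ => 1
  | t :: ts, ds, curr, K =>
    let p := popDeparted t ds curr
    let curr' := p.2 + 1
    if curr' > K then 0 else hotelLoopB ts p.1 curr' K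

def hotel_alt (arrive : List Int) (depart : List Int) (K : Int) : Int :=
  let sarr := PySem.List.sorted arrive (fun x => x)
  let sdep := PySem.List.sorted (PySem.List.slice depart none (some (PySem.List.len arrive))) (fun x => x)
  hotelLoopB sarr sdep 0 K

-- ===== PRECONDITION & SPEC =====
-- A indexes depart[i] for every i < len(arrive), so it raises IndexError iff depart is shorter
-- than arrive; exactly those inputs are excluded.
def Pre_hotel (arrive : List Int) (depart : List Int) (K : Int) : Prop :=
  arrive.length ≤ depart.length

instance (arrive : List Int) (depart : List Int) (K : Int) : Decidable (Pre_hotel arrive depart K) := by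
  unfold Pre_hotel; infer_instance

def pvWitness_hotel : List Int × List Int × Int := ([1, 2], [3, 4], 1)

def Spec_hotel (arrive : List Int) (depart : List Int) (K : Int) (out : Int) : Prop := out = hotel_alt arrive depart K
instance (arrive : List Int) (depart : List Int) (K : Int) (out : Int) : Decidable (Spec_hotel arrive depart K out) := by unfold Spec_hotel; infer_instance

-- ===== CLAIM (what is proved, stated in full; the proofs are below) =====
def Claim_equal_hotel : Prop := ∀ (arrive : List Int) (depart : List Int) (K : Int), Dom_hotel arrive depart K → Pre_hotel arrive depart K → Spec_hotel arrive depart K (hotel arrive depart K)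

-- ===== LEMMAS AND PROOFS =====

-- the (non-strict) lexicographic order on events that A's ans.sort() realises
def lexLe (a b : Int × Int) : Prop := a.1 < b.1 ∨ (a.1 = b.1 ∧ a.2 ≤ b.2)

theorem lexLe_antisymm {a b : Int × Int} (h1 : lexLe a b) (h2 : lexLe b a) : a = b := by
  unfold lexLe at h1 h2
  have : a.1 = b.1 ∧ a.2 = b.2 := by omega
  exact Prod.ext this.1 this.2

theorem lexLe_trans {a b c : Int × Int} (h1 : lexLe a b) (h2 : lexLe b c) : lexLe a c := by
  unfold lexLe at *; omega

-- sorted2's comparison function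
def lexLtB (a b : Int × Int) : Bool :=
  decide (a.1 < b.1) || !decide (b.1 < a.1) && decide (a.2 < b.2)

theorem lexLtB_true {a b : Int × Int} (h : lexLtB a b = true) : lexLe a b := by
  unfold lexLtB at h; unfold lexLe; simp at h; omega

theorem lexLtB_false {a b : Int × Int} (h : lexLtB a b = false) : lexLe b a := by
  unfold lexLtB at h; unfold lexLe; simp at h; omega

theorem pairwise_insertBy_lex (x : Int × Int) (ys : List (Int × Int))
    (h : ys.Pairwise lexLe) :
    (PySem.List.insertBy lexLtB x ys).Pairwise lexLe := by
  induction ys with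
  | nil => simp [PySem.List.insertBy]
  | cons y ys ih =>
    rcases List.pairwise_cons.1 h with ⟨hy, hys⟩
    by_cases hb : lexLtB x y = true
    · rw [show PySem.List.insertBy lexLtB x (y :: ys) = x :: y :: ys by
        simp [PySem.List.insertBy, hb]]
      refine List.Pairwise.cons ?_ (List.Pairwise.cons hy hys)
      intro z hz
      rcases List.mem_cons.1 hz with rfl | hz
      · exact lexLtB_true hb
      · exact lexLe_trans (lexLtB_true hb) (hy _ hz)
    · rw [show PySem.List.insertBy lexLtB x (y :: ys) = y :: PySem.List.insertBy lexLtB x ys by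
        simp [PySem.List.insertBy, hb]]
      refine List.Pairwise.cons ?_ (ih hys)
      intro z hz
      rcases (PySem.List.mem_insertBy lexLtB x z ys).1 hz with rfl | hz
      · exact lexLtB_false (by simpa using hb)
      · exact hy _ hz

theorem pairwise_foldl_insertBy_lex (xs : List (Int × Int)) (acc : List (Int × Int))
    (h : acc.Pairwise lexLe) :
    (xs.foldl (fun acc x => PySem.List.insertBy lexLtB x acc) acc).Pairwise lexLe := by
  induction xs generalizing acc with
  | nil => exact h
  | cons x xs ih => exact ih _ (pairwise_insertBy_lex x acc h)

theorem sorted2_pairwise_lex (xs : List (Int × Int)) :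
    (PySem.List.sorted2 xs Prod.fst Prod.snd).Pairwise lexLe := by
  have : PySem.List.sorted2 xs Prod.fst Prod.snd
      = xs.foldl (fun acc x => PySem.List.insertBy lexLtB x acc) [] := rfl
  rw [this]
  exact pairwise_foldl_insertBy_lex xs [] (by simp)

-- any lexLe-pairwise rearrangement of xs IS sorted2 xs fst snd
theorem sorted2_eq_of_perm_of_pairwise (xs ys : List (Int × Int))
    (hp : ys.Perm xs) (hs : ys.Pairwise lexLe) :
    PySem.List.sorted2 xs Prod.fst Prod.snd = ys := by
  refine List.Perm.eq_of_pairwise ?_ (sorted2_pairwise_lex xs) hs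
    ((PySem.List.sorted2_perm xs Prod.fst Prod.snd false).trans hp.symm)
  intro a b _ _ h1 h2
  exact lexLe_antisymm h1 h2

-- the merged event stream B's two-pointer walk traverses
def mergeEv : List Int → List Int → List (Int × Int)
  | [], ds => ds.map (fun d => (d, 0))
  | a :: as, [] => (a, 1) :: mergeEv as []
  | a :: as, d :: ds => if d ≤ a then (d, 0) :: mergeEv (a :: as) ds else (a, 1) :: mergeEv as (d :: ds)
  termination_by sa ds => sa.length + ds.length

theorem mergeEv_perm (sa sd : List Int) :
    (mergeEv sa sd).Perm (sa.map (fun a => (a, 1)) ++ sd.map (fun d => (d, 0))) := by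
  induction sa, sd using mergeEv.induct with
  | case1 ds => simp [mergeEv]
  | case2 a as ih => simpa [mergeEv] using ih.cons (a, 1)
  | case3 a as d ds hd ih =>
    rw [show mergeEv (a :: as) (d :: ds) = (d, 0) :: mergeEv (a :: as) ds by
      simp [mergeEv, hd]]
    refine ((ih.cons (d, 0)).trans ?_)
    simpa using (List.perm_middle (a := (d, 0))
      (l₁ := (a :: as).map (fun a => (a, 1))) (l₂ := ds.map (fun d => (d, 0)))).symm
  | case4 a as d ds hd ih =>
    rw [show mergeEv (a :: as) (d :: ds) = (a, 1) :: mergeEv as (d :: ds) by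
      simp [mergeEv, hd]]
    simpa using ih.cons (a, 1)

theorem mem_mergeEv {e : Int × Int} {sa sd : List Int} (h : e ∈ mergeEv sa sd) :
    (∃ a ∈ sa, e = (a, 1)) ∨ (∃ d ∈ sd, e = (d, 0)) := by
  have := (mergeEv_perm sa sd).mem_iff.1 h
  simp only [List.mem_append, List.mem_map] at this
  rcases this with ⟨a, ha, rfl⟩ | ⟨d, hd, rfl⟩
  · exact Or.inl ⟨a, ha, rfl⟩
  · exact Or.inr ⟨d, hd, rfl⟩

theorem mergeEv_pairwise (sa sd : List Int)
    (ha : sa.Pairwise (· ≤ ·)) (hd : sd.Pairwise (· ≤ ·)) :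
    (mergeEv sa sd).Pairwise lexLe := by
  induction sa, sd using mergeEv.induct with
  | case1 ds =>
    simp only [mergeEv]
    refine (List.pairwise_map).2 (hd.imp ?_)
    intro a b hab; unfold lexLe; omega
  | case2 a as ih =>
    rcases List.pairwise_cons.1 ha with ⟨haas, has⟩
    simp only [mergeEv]
    refine List.Pairwise.cons ?_ (ih has hd)
    intro e he
    rcases mem_mergeEv he with ⟨a', ha', rfl⟩ | ⟨d', hd', rfl⟩
    · have := haas _ ha'; unfold lexLe; simp; omega
    · simp at hd'
  | case3 a as d ds hdle ih =>
    rcases List.pairwise_cons.1 hd with ⟨hdds, hds⟩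
    rw [show mergeEv (a :: as) (d :: ds) = (d, 0) :: mergeEv (a :: as) ds by
      simp [mergeEv, hdle]]
    refine List.Pairwise.cons ?_ (ih ha hds)
    intro e he
    rcases mem_mergeEv he with ⟨a', ha', rfl⟩ | ⟨d', hd', rfl⟩
    · have : a ≤ a' := by
        rcases List.mem_cons.1 ha' with rfl | ha'
        · exact le_refl _
        · exact (List.pairwise_cons.1 ha).1 _ ha'
      unfold lexLe; simp; omega
    · have := hdds _ hd'; unfold lexLe; simp; omega
  | case4 a as d ds hdle ih =>
    rcases List.pairwise_cons.1 ha with ⟨haas, has⟩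
    rw [show mergeEv (a :: as) (d :: ds) = (a, 1) :: mergeEv as (d :: ds) by
      simp [mergeEv, hdle]]
    refine List.Pairwise.cons ?_ (ih has hd)
    intro e he
    rcases mem_mergeEv he with ⟨a', ha', rfl⟩ | ⟨d', hd', rfl⟩
    · have := haas _ ha'; unfold lexLe; simp; omega
    · have : d ≤ d' := by
        rcases List.mem_cons.1 hd' with rfl | hd'
        · exact le_refl _
        · exact (List.pairwise_cons.1 hd).1 _ hd'
      unfold lexLe; simp; omega

-- flatMap of two-element blocks is a permutation of the two projections
theorem flatMap_pair_perm (l : List Int) (f g : Int → Int × Int) :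
    (l.flatMap (fun i => [f i, g i])).Perm (l.map f ++ l.map g) := by
  induction l with
  | nil => simp
  | cons x t ih =>
    simp only [List.flatMap_cons, List.map_cons, List.cons_append]
    refine List.Perm.cons (f x) ?_
    exact ((ih.cons (g x)).trans (List.perm_middle (a := g x)
      (l₁ := t.map f) (l₂ := t.map g)).symm)

theorem map_pyGetD_pyRange_take (xs : List Int) (n : Nat) (h : n ≤ xs.length) :
    ((PySem.List.pyRange 0 (n : Int) 1).map (fun j => PySem.List.pyGetD xs j 0)) = xs.take n := by
  rw [PySem.List.pyRange_one, List.map_map]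
  refine List.ext_getElem ?_ ?_
  · simp [h]
  · intro k hk1 hk2
    have hk : k < n := by simpa using hk1
    simp only [List.getElem_map, List.getElem_range, Function.comp]
    have hc : ((0 : Int) + (k : Int)) = ((k : Nat) : Int) := by ring
    rw [hc, PySem.List.pyGetD_natCast, List.getElem_take]
    exact List.getD_eq_getElem xs 0 (by omega)

-- A's building loop produces exactly the interleaved event list
theorem hotel_events (arrive depart : List Int) (h : arrive.length ≤ depart.length) :
    ((PySem.List.pyRange 0 (PySem.List.len arrive) 1).foldl
      (fun acc i => (acc ++ [(PySem.List.pyGetD arrive i 0, (1 : Int))]) ++ [(PySem.List.pyGetD depart i 0, (0 : Int))]) []).Perm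
    (arrive.map (fun a => (a, 1)) ++ (depart.take arrive.length).map (fun d => (d, 0))) := by
  rw [PySem.List.foldl_congr_mem (PySem.List.pyRange 0 (PySem.List.len arrive) 1)
      (fun acc i => (acc ++ [(PySem.List.pyGetD arrive i 0, (1 : Int))]) ++ [(PySem.List.pyGetD depart i 0, (0 : Int))])
      (fun acc i => acc ++ [(PySem.List.pyGetD arrive i 0, (1 : Int)), (PySem.List.pyGetD depart i 0, (0 : Int))])
      [] (by intro acc x _; simp)]
  rw [PySem.List.foldl_append_eq_flatMap]
  simp only [List.nil_append]
  refine (flatMap_pair_perm _ _ _).trans ?_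
  have hm := PySem.List.map_pyGetD_pyRange_zero arrive 0
  have h1 : (PySem.List.pyRange 0 (PySem.List.len arrive) 1).map
      (fun i => (PySem.List.pyGetD arrive i 0, (1 : Int)))
      = arrive.map (fun a => (a, 1)) := by
    conv_rhs => rw [← hm]
    rw [List.map_map]
    rfl
  have hlen : PySem.List.len arrive = ((arrive.length : Nat) : Int) := by
    simp [PySem.List.len]
  have h2 : (PySem.List.pyRange 0 (PySem.List.len arrive) 1).map
      (fun i => (PySem.List.pyGetD depart i 0, (0 : Int)))
      = (depart.take arrive.length).map (fun d => (d, 0)) := by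
    rw [hlen]
    conv_rhs => rw [← map_pyGetD_pyRange_take depart arrive.length h]
    rw [List.map_map]
    rfl
  rw [h1, h2]

-- popDeparted facts
theorem popDeparted_count (t : Int) (sd : List Int) (curr : Int) :
    (popDeparted t sd curr).2 + (sd.length : Int)
      = curr + ((popDeparted t sd curr).1.length : Int)
      ∧ (popDeparted t sd curr).1.length ≤ sd.length := by
  induction sd generalizing curr with
  | nil => simp [popDeparted]
  | cons d ds ih =>
    obtain ⟨h1, h2⟩ := ih (curr - 1)
    by_cases hd : d ≤ t
    · simp only [popDeparted, if_pos hd, List.length_cons]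
      constructor
      · push_cast at h1 ⊢; omega
      · omega
    · simp [popDeparted, hd]

theorem popDeparted_no (t : Int) (sd : List Int) (curr : Int)
    (h : sd = [] ∨ ∀ d ∈ sd.head?, ¬ d ≤ t) :
    popDeparted t sd curr = (sd, curr) := by
  cases sd with
  | nil => simp [popDeparted]
  | cons d ds =>
    rcases h with h | h
    · cases h
    · simp [popDeparted, h d rfl]

-- B surely overflows when even the final concurrent count exceeds K
theorem loopB_overflow : ∀ (sa sd : List Int) (curr K : Int), sa ≠ [] →
    K < curr + (sa.length : Int) - (sd.length : Int) → hotelLoopB sa sd curr K = 0 := by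
  intro sa
  induction sa with
  | nil => intro sd curr K h; exact absurd rfl h
  | cons a as ih =>
    intro sd curr K _ hK
    simp only [hotelLoopB]
    obtain ⟨hc, hlen⟩ := popDeparted_count a sd curr
    by_cases hover : (popDeparted a sd curr).2 + 1 > K
    · simp [hover]
    · have hK' : K < (popDeparted a sd curr).2 + 1 + (as.length : Int)
          - ((popDeparted a sd curr).1.length : Int) := by
        simp only [List.length_cons] at hK; push_cast at hK ⊢; omega
      have hne : as ≠ [] := by
        intro h; subst h; simp at hK'; omega
      simp only [if_neg hover]
      exact ih _ _ _ hne hK'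

-- A over a pure-departure tail never returns 0
theorem loopA_departs (ds : List Int) : ∀ curr active K,
    hotelLoopA (ds.map (fun d => (d, 0))) curr active K = 1 := by
  induction ds with
  | nil => intro curr active K; simp [hotelLoopA]
  | cons d ds ih => intro curr active K; simp [hotelLoopA, ih]

-- the heart of the equivalence: A's walk of the merged events equals B's two-pointer walk
theorem loopAB : ∀ (sa sd : List Int) (curr active K : Int),
    sa.Pairwise (· ≤ ·) → sd.Pairwise (· ≤ ·) →
    (active ≤ K ∨ active ≤ curr + (sa.length : Int) - (sd.length : Int)) →
    hotelLoopA (mergeEv sa sd) curr active K = hotelLoopB sa sd curr K := by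
  intro sa sd
  induction sa, sd using mergeEv.induct with
  | case1 ds =>
    intro curr active K _ _ _
    simp only [mergeEv]
    rw [loopA_departs]
    simp [hotelLoopB]
  | case2 a as ih =>
    intro curr active K ha _ hinv
    simp only [mergeEv, hotelLoopA, hotelLoopB]
    rw [popDeparted_no a [] curr (Or.inl rfl)]
    simp only []
    by_cases hover : curr + 1 > K
    · have : max active (curr + 1) > K := by omega
      simp [this, hover]
    · by_cases hact : active ≤ K
      · have : ¬ (max active (curr + 1) > K) := by omega
        simp only [if_neg this, if_neg hover]
        exact ih (curr + 1) (max active (curr + 1)) K (List.pairwise_cons.1 ha).2 (by simp) (Or.inl (by omega))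
      · -- A returns 0 now; B must also end in 0 because the final count already exceeds K
        have hr : active ≤ curr + ((a :: as).length : Int) - (0 : Int) := by
          rcases hinv with h | h
          · exact absurd h hact
          · simpa using h
        have : max active (curr + 1) > K := by omega
        simp only [if_pos this, if_neg hover]
        have hne : as ≠ [] := by
          intro h; subst h; simp at hr; omega
        exact (loopB_overflow as [] (curr + 1) K hne (by simp at hr ⊢; omega)).symm
  | case3 a as d ds hdle ih =>
    intro curr active K ha hd hinv
    rw [show mergeEv (a :: as) (d :: ds) = (d, 0) :: mergeEv (a :: as) ds by
      simp [mergeEv, hdle]]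
    rw [show hotelLoopA ((d, 0) :: mergeEv (a :: as) ds) curr active K
        = hotelLoopA (mergeEv (a :: as) ds) (curr - 1) active K by
      simp [hotelLoopA]]
    rw [show hotelLoopB (a :: as) (d :: ds) curr K = hotelLoopB (a :: as) ds (curr - 1) K by
      simp only [hotelLoopB, popDeparted, if_pos hdle]]
    refine ih (curr - 1) active K ha (List.pairwise_cons.1 hd).2 ?_
    rcases hinv with h | h
    · exact Or.inl h
    · refine Or.inr ?_; simp at h ⊢; omega
  | case4 a as d ds hdle ih =>
    intro curr active K ha hd hinv
    rw [show mergeEv (a :: as) (d :: ds) = (a, 1) :: mergeEv as (d :: ds) by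
      simp [mergeEv, hdle]]
    simp only [hotelLoopA, hotelLoopB]
    rw [popDeparted_no a (d :: ds) curr (Or.inr (by intro x hx; simp at hx; omega))]
    simp only []
    by_cases hover : curr + 1 > K
    · have : max active (curr + 1) > K := by omega
      simp [this, hover]
    · by_cases hact : active ≤ K
      · have : ¬ (max active (curr + 1) > K) := by omega
        simp only [if_neg this, if_neg hover]
        exact ih (curr + 1) (max active (curr + 1)) K (List.pairwise_cons.1 ha).2 hd (Or.inl (by omega))
      · have hr : active ≤ curr + ((a :: as).length : Int) - ((d :: ds).length : Int) := by
          rcases hinv with h | h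
          · exact absurd h hact
          · exact h
        have : max active (curr + 1) > K := by omega
        simp only [if_pos this, if_neg hover]
        have hK' : K < curr + 1 + (as.length : Int) - ((d :: ds).length : Int) := by
          simp at hr ⊢; omega
        have hne : as ≠ [] := by
          intro h; subst h; simp at hK'; omega
        exact (loopB_overflow as (d :: ds) (curr + 1) K hne hK').symm

-- ===== VERDICT (by name: the statement is the Claim_ definition above) =====
theorem hotel_spec : Claim_equal_hotel := by
  intro arrive depart K _ hpre
  unfold Spec_hotel hotel hotel_alt
  simp only []
  have hlen : PySem.List.len arrive = ((arrive.length : Nat) : Int) := by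
    simp [PySem.List.len]
  have hslice : PySem.List.slice depart none (some (PySem.List.len arrive))
      = depart.take arrive.length := by
    rw [hlen]; exact PySem.List.slice_to_natCast depart arrive.length
  set sarr := PySem.List.sorted arrive (fun x => x) with hsarr
  have hsdep : PySem.List.sorted (PySem.List.slice depart none (some (PySem.List.len arrive))) (fun x => x)
      = PySem.List.sorted (depart.take arrive.length) (fun x => x) := by rw [hslice]
  rw [hsdep]
  set sdep := PySem.List.sorted (depart.take arrive.length) (fun x => x) with hsdepd
  have hpa : sarr.Pairwise (· ≤ ·) := by
    simpa using PySem.List.sorted_pairwise arrive (fun x => x)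
  have hpd : sdep.Pairwise (· ≤ ·) := by
    simpa using PySem.List.sorted_pairwise (depart.take arrive.length) (fun x => x)
  have hmerge : PySem.List.sorted2
      ((PySem.List.pyRange 0 (PySem.List.len arrive) 1).foldl
        (fun acc i => (acc ++ [(PySem.List.pyGetD arrive i 0, (1 : Int))]) ++ [(PySem.List.pyGetD depart i 0, (0 : Int))]) [])
      Prod.fst Prod.snd = mergeEv sarr sdep := by
    refine sorted2_eq_of_perm_of_pairwise _ _ ?_ (mergeEv_pairwise _ _ hpa hpd)
    refine (mergeEv_perm sarr sdep).trans ?_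
    refine List.Perm.trans ?_ (hotel_events arrive depart hpre).symm
    exact List.Perm.append
      ((PySem.List.sorted_perm arrive (fun x => x) false).map _)
      ((PySem.List.sorted_perm (depart.take arrive.length) (fun x => x) false).map _)
  rw [hmerge]
  have hla : (sarr.length : Int) = (arrive.length : Int) := by
    have : sarr.length = arrive.length := by
      rw [hsarr]; exact PySem.List.length_sorted arrive (fun x => x) false
    exact_mod_cast this
  have hld : (sdep.length : Int) = (arrive.length : Int) := by
    have : sdep.length = arrive.length := by
      rw [hsdepd, PySem.List.length_sorted]
      exact List.length_take_of_le hpre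
    exact_mod_cast this
  exact loopAB sarr sdep 0 0 K hpa hpd (Or.inr (by omega))
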